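-- pv_equiv track=rewrite | github.com/Valerio1903/Manens_Toolbar | Manens.tab/Revit to Excel.panel/Revit to Excel ELE.pushbutton/script.py | EEQ_chunk_consecutive_rows
-- ===== SOURCE A (Python) =====
-- def EEQ_chunk_consecutive_rows(sorted_rows):
--     runs = []
--     if not sorted_rows: return runs
--     start_r = prev_r = sorted_rows[0]
--     for r in sorted_rows[1:]:
--         if r == prev_r + 1:
--             prev_r = r
--         else:
--             runs.append((start_r, prev_r))
--             start_r = prev_r = r
--     runs.append((start_r, prev_r))
--     return runs
-- ===== SOURCE B (Python) =====
-- def EEQ_chunk_consecutive_rows(sorted_rows):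
--     if not sorted_rows:
--         return []
--     pairs = list(zip(sorted_rows, sorted_rows[1:]))
--     breaks = [p for p in pairs if p[1] != p[0] + 1]
--     starts = [sorted_rows[0]] + [b for _, b in breaks]
--     ends = [a for a, _ in breaks] + [sorted_rows[-1]]
--     return list(zip(starts, ends))
-- ===== Notes on version B (the rewrite author's own statement) =====
-- stated objective: alternative
-- what changed: Replaces A's stateful single-pass run accumulator (start/prev registers updated per element) with a stateless staged pipeline: zip the list with its tail, filter out the break pairs, derive the run-start list and run-end list from those break pairs plus the endpoints, and zip starts with ends.
import Mathlib
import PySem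

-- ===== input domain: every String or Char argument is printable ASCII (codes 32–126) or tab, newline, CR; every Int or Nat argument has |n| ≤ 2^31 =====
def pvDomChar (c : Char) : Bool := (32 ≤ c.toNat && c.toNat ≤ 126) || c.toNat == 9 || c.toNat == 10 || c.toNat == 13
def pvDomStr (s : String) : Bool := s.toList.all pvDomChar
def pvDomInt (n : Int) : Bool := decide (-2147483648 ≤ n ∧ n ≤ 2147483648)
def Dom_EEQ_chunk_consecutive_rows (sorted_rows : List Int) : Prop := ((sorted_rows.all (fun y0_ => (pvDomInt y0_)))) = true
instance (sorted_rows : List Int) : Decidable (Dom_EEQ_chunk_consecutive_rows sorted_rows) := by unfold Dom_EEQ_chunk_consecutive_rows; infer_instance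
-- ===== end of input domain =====

-- B replaces A's stateful run accumulator with a stateless staged pipeline:
-- zip adjacent elements, filter the break pairs, build starts/ends lists, zip them.


-- ===== PORT A =====
-- A: fold over the tail with state (runs, start_r, prev_r), append the final run at the end.
def pvStepA (s : List (Int × Int) × Int × Int) (r : Int) : List (Int × Int) × Int × Int :=
  if r = s.2.2 + 1 then (s.1, s.2.1, r) else (s.1 ++ [(s.2.1, s.2.2)], r, r)

def EEQ_chunk_consecutive_rows (sorted_rows : List Int) : List (Int × Int) :=
  match sorted_rows with
  | [] => []
  | x :: rest =>
      let st := rest.foldl pvStepA ([], x, x)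
      st.1 ++ [(st.2.1, st.2.2)]

-- ===== PORT B =====
-- B: pairs = zip(xs, xs[1:]); breaks = pairs with b != a+1;
-- starts = xs[0] :: seconds of breaks; ends = firsts of breaks ++ [xs[-1]]; zip starts ends.
def EEQ_chunk_consecutive_rows_alt (sorted_rows : List Int) : List (Int × Int) :=
  match sorted_rows with
  | [] => []
  | x :: rest =>
      let breaks := ((x :: rest).zip rest).filter (fun p => p.2 != p.1 + 1)
      ([x] ++ breaks.map (fun p => p.2)).zip
        (breaks.map (fun p => p.1) ++ [(PySem.List.pyGet? (x :: rest) (-1)).getD 0])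

-- ===== PRECONDITION & SPEC =====
def Spec_EEQ_chunk_consecutive_rows (sorted_rows : List Int) (out : List (Int × Int)) : Prop := out = EEQ_chunk_consecutive_rows_alt sorted_rows
instance (sorted_rows : List Int) (out : List (Int × Int)) : Decidable (Spec_EEQ_chunk_consecutive_rows sorted_rows out) := by unfold Spec_EEQ_chunk_consecutive_rows; infer_instance

-- ===== CLAIM (what is proved, stated in full; the proofs are below) =====
def Claim_equal_EEQ_chunk_consecutive_rows : Prop := ∀ (sorted_rows : List Int), Dom_EEQ_chunk_consecutive_rows sorted_rows → Spec_EEQ_chunk_consecutive_rows sorted_rows (EEQ_chunk_consecutive_rows sorted_rows)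

-- ===== LEMMAS AND PROOFS =====
-- Proof-side characterization: peel one maximal consecutive run off the front.
def pvRunEnd (prev : Int) : List Int → Int × List Int
  | [] => (prev, [])
  | y :: ys => if y = prev + 1 then pvRunEnd y ys else (prev, y :: ys)

theorem pvRunEnd_len (prev : Int) (l : List Int) : (pvRunEnd prev l).2.length ≤ l.length := by
  induction l generalizing prev with
  | nil => simp [pvRunEnd]
  | cons y ys ih =>
      simp only [pvRunEnd]
      split
      · exact le_trans (ih y) (by simp)
      · simp

def pvChunks : List Int → List (Int × Int)
  | [] => []
  | x :: rest =>
      let p := pvRunEnd x rest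
      (x, p.1) :: pvChunks p.2
termination_by l => l.length
decreasing_by
  simp only [List.length_cons]
  exact Nat.lt_succ_of_le (pvRunEnd_len x rest)

-- A's loop invariant: running the fold from (runs, s, p) and closing the last run
-- equals runs, then (s, end of current run), then the chunks of the remaining suffix.
theorem pv_loopA (l : List Int) (runs : List (Int × Int)) (s p : Int) :
    (let st := l.foldl pvStepA (runs, s, p); st.1 ++ [(st.2.1, st.2.2)]) =
      runs ++ ((s, (pvRunEnd p l).1) :: pvChunks (pvRunEnd p l).2) := by
  induction l generalizing runs s p with
  | nil => simp [pvRunEnd, pvChunks]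
  | cons y ys ih =>
      simp only [List.foldl_cons, pvStepA, pvRunEnd]
      by_cases h : y = p + 1
      · simp only [h, if_pos]
        exact ih runs s (p + 1)
      · simp only [if_neg h]
        rw [ih]
        rw [pvChunks]
        simp [List.append_assoc]

-- B equals the run-peeling characterization.
theorem pvB_eq (rest : List Int) : ∀ x : Int,
    EEQ_chunk_consecutive_rows_alt (x :: rest) =
      (x, (pvRunEnd x rest).1) :: pvChunks (pvRunEnd x rest).2 := by
  induction rest with
  | nil =>
      intro x
      simp [EEQ_chunk_consecutive_rows_alt, pvRunEnd, pvChunks,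
        PySem.List.pyGet?_neg_one]
  | cons y ys ih =>
      intro x
      by_cases h : y = x + 1
      · -- the first pair (x, y) is not a break; only the head start changes vs alt (y :: ys)
        have hy := ih y
        simp only [EEQ_chunk_consecutive_rows_alt, List.zip_cons_cons, List.filter_cons,
          PySem.List.pyGet?_neg_one, List.getLast?_cons_cons] at hy ⊢
        rw [show ((x, y).2 != (x, y).1 + 1) = false by simp [h]]
        simp only [Bool.false_eq_true, if_false, List.cons_append, List.nil_append]
        -- goal and hy are zips of (x :: s) resp. (y :: s) with the same nonempty ends list
        obtain ⟨e0, es, he⟩ : ∃ e0 es,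
            (List.map (fun p => p.1) (((y :: ys).zip ys).filter (fun p => p.2 != p.1 + 1)) ++
              [((y :: ys).getLast?).getD 0]) = e0 :: es := by
          rcases hl : List.map (fun p => (p : Int × Int).1)
              (((y :: ys).zip ys).filter (fun p => p.2 != p.1 + 1)) with _ | ⟨a, as⟩
          · exact ⟨_, _, rfl⟩
          · exact ⟨_, _, rfl⟩
        rw [he] at hy ⊢
        simp only [List.cons_append, List.nil_append, List.zip_cons_cons] at hy ⊢
        rw [List.cons_eq_cons] at hy
        obtain ⟨h0, h2⟩ := hy
        have h1 : e0 = (pvRunEnd y ys).1 := congrArg Prod.snd h0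
        rw [show pvRunEnd x (y :: ys) = pvRunEnd y ys by simp [pvRunEnd, h]]
        rw [h1]
        exact congrArg _ h2
      · -- (x, y) is a break: the run is the singleton x, then recurse on y :: ys
        have hy := ih y
        simp only [EEQ_chunk_consecutive_rows_alt, List.zip_cons_cons, List.filter_cons,
          PySem.List.pyGet?_neg_one, List.getLast?_cons_cons] at hy ⊢
        rw [show ((x, y).2 != (x, y).1 + 1) = true by simp [h]]
        simp only [if_true, List.map_cons, List.cons_append, List.nil_append,
          List.zip_cons_cons]
        rw [show pvRunEnd x (y :: ys) = (x, y :: ys) by simp [pvRunEnd, h]]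
        rw [pvChunks]
        simp only [List.cons.injEq, true_and]
        simpa using hy

-- ===== VERDICT (by name: the statement is the Claim_ definition above) =====
theorem EEQ_chunk_consecutive_rows_spec : Claim_equal_EEQ_chunk_consecutive_rows := by
  intro sorted_rows _
  unfold Spec_EEQ_chunk_consecutive_rows
  match sorted_rows with
  | [] => rfl
  | x :: rest =>
      show (let st := rest.foldl pvStepA ([], x, x); st.1 ++ [(st.2.1, st.2.2)]) = _
      rw [pv_loopA, pvB_eq]
      simp
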